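-- pv_equiv track=rewrite | github.com/jobsalhi/Data-driven-Analysis-of-Football-Player-Performance | Scrapping/Scripts/sofifa_scraper.py | _get_column_order
-- ===== SOURCE A (Python) =====
-- def _get_column_order(stats_dict):
--     """Define and return the column order for CSV"""
--     priority_cols = [
--         'player_id', 'version', 'name', 'full_name', 'description', 'image',
--         'height_cm', 'weight_kg', 'dob', 'positions', 'overall_rating', 'potential',
--         'value', 'wage', 'preferred_foot', 'weak_foot', 'skill_moves',
--         'international_reputation', 'body_type', 'real_face',
--         'release_clause', 'specialities', 'club_id', 'club_name', 'club_league_id',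
--         'club_league_name', 'club_logo', 'club_rating', 'club_position',
--         'club_kit_number', 'club_joined', 'club_contract_valid_until',
--         'country_id', 'country_name', 'country_league_id', 'country_league_name',
--         'country_flag', 'country_rating', 'country_position', 'country_kit_number',
--         'attacking_crossing', 'attacking_finishing', 'attacking_heading_accuracy',
--         'attacking_short_passing', 'attacking_volleys',
--         'skill_dribbling', 'skill_curve', 'skill_fk_accuracy', 'skill_long_passing',
--         'skill_ball_control',
--         'movement_acceleration', 'movement_sprint_speed', 'movement_agility',
--         'movement_reactions', 'movement_balance',
--         'power_shot_power', 'power_jumping', 'power_stamina', 'power_strength',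
--         'power_long_shots',
--         'mentality_aggression', 'mentality_interceptions', 'mentality_att_positioning',
--         'mentality_vision', 'mentality_penalties', 'mentality_composure',
--         'defending_defensive_awareness', 'defending_standing_tackle', 'defending_sliding_tackle',
--         'goalkeeping_gk_diving', 'goalkeeping_gk_handling', 'goalkeeping_gk_kicking',
--         'goalkeeping_gk_positioning', 'goalkeeping_gk_reflexes',
--         'play_styles', 'url'
--     ]
--
--     # Add priority columns first, then any additional columns
--     all_keys = set(stats_dict.keys())
--     other_cols = sorted([col for col in all_keys if col not in priority_cols])
--     columns = [col for col in priority_cols if col in all_keys] + other_cols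
--     return columns
-- ===== SOURCE B (Python) =====
-- _PRIORITY_CHUNKS = [
--     "player_id version name full_name description image",
--     "height_cm weight_kg dob positions overall_rating potential",
--     "value wage preferred_foot weak_foot skill_moves",
--     "international_reputation body_type real_face",
--     "release_clause specialities club_id club_name club_league_id",
--     "club_league_name club_logo club_rating club_position",
--     "club_kit_number club_joined club_contract_valid_until",
--     "country_id country_name country_league_id country_league_name",
--     "country_flag country_rating country_position country_kit_number",
--     "attacking_crossing attacking_finishing attacking_heading_accuracy",
--     "attacking_short_passing attacking_volleys",
--     "skill_dribbling skill_curve skill_fk_accuracy skill_long_passing",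
--     "skill_ball_control",
--     "movement_acceleration movement_sprint_speed movement_agility",
--     "movement_reactions movement_balance",
--     "power_shot_power power_jumping power_stamina power_strength",
--     "power_long_shots",
--     "mentality_aggression mentality_interceptions mentality_att_positioning",
--     "mentality_vision mentality_penalties mentality_composure",
--     "defending_defensive_awareness defending_standing_tackle defending_sliding_tackle",
--     "goalkeeping_gk_diving goalkeeping_gk_handling goalkeeping_gk_kicking",
--     "goalkeeping_gk_positioning goalkeeping_gk_reflexes",
--     "play_styles url",
-- ]
-- _PRIORITY = [w for chunk in _PRIORITY_CHUNKS for w in chunk.split()]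
--
--
-- def _get_column_order(stats_dict):
--     """Define and return the column order for CSV"""
--     # One unified sort: priority columns by their rank, extras after them by name
--     rank = {c: i for i, c in enumerate(_PRIORITY)}
--     n = len(_PRIORITY)
--     return sorted(stats_dict.keys(), key=lambda c: (rank.get(c, n), c))
-- ===== Notes on version B (the rewrite author's own statement) =====
-- stated objective: idiomatic
-- what changed: Replaces A's two-phase construction (filter the priority list against the key set, separately sort the leftover extra columns, concatenate) with a single sorted() call over all keys using the composite key (rank in a precomputed rank dict with fallback len(priority), column name); the priority constant is a module-level split string computed once instead of a per-call list literal.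
import Mathlib
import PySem

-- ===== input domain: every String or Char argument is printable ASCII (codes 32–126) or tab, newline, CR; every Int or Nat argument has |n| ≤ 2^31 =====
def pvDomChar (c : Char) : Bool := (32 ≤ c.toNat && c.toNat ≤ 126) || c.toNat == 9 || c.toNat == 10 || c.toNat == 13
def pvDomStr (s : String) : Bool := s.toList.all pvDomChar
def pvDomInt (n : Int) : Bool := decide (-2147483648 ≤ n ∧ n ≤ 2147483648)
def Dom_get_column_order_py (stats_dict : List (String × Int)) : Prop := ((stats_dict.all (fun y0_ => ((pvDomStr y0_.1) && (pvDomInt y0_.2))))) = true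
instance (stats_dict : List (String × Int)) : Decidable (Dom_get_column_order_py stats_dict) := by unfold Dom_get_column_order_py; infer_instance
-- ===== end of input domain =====

-- B replaces A's two-phase construction (filter the priority list, sort the leftover extras,
-- concatenate) by ONE sort of all keys under the composite key (rank in a precomputed rank
-- dict, name); objective: idiomatic single unified sort. Equal cost, no speed claim.

-- ===== PORT A =====
-- A's per-call priority-column list literal.
def pvPriorityCols : List String := [
  "player_id", "version", "name", "full_name", "description", "image",
  "height_cm", "weight_kg", "dob", "positions", "overall_rating", "potential",
  "value", "wage", "preferred_foot", "weak_foot", "skill_moves",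
  "international_reputation", "body_type", "real_face",
  "release_clause", "specialities", "club_id", "club_name", "club_league_id",
  "club_league_name", "club_logo", "club_rating", "club_position",
  "club_kit_number", "club_joined", "club_contract_valid_until",
  "country_id", "country_name", "country_league_id", "country_league_name",
  "country_flag", "country_rating", "country_position", "country_kit_number",
  "attacking_crossing", "attacking_finishing", "attacking_heading_accuracy",
  "attacking_short_passing", "attacking_volleys",
  "skill_dribbling", "skill_curve", "skill_fk_accuracy", "skill_long_passing",
  "skill_ball_control",
  "movement_acceleration", "movement_sprint_speed", "movement_agility",
  "movement_reactions", "movement_balance",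
  "power_shot_power", "power_jumping", "power_stamina", "power_strength",
  "power_long_shots",
  "mentality_aggression", "mentality_interceptions", "mentality_att_positioning",
  "mentality_vision", "mentality_penalties", "mentality_composure",
  "defending_defensive_awareness", "defending_standing_tackle", "defending_sliding_tackle",
  "goalkeeping_gk_diving", "goalkeeping_gk_handling", "goalkeeping_gk_kicking",
  "goalkeeping_gk_positioning", "goalkeeping_gk_reflexes",
  "play_styles", "url"]

def get_column_order_py (stats_dict : List (String × Int)) : List String :=
  -- all_keys = set(stats_dict.keys())
  let all_keys : PySem.Set String := PySem.Set.ofList (PySem.Dict.keys (PySem.Dict.ofList stats_dict))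
  -- other_cols = sorted([col for col in all_keys if col not in priority_cols])
  let other_cols := PySem.List.sorted (List.filter (fun col => !(pvPriorityCols.contains col)) all_keys) (fun x => x) false
  -- columns = [col for col in priority_cols if col in all_keys] + other_cols
  List.filter (fun col => PySem.Set.contains all_keys col) pvPriorityCols ++ other_cols

-- ===== PORT B =====
-- _PRIORITY_CHUNKS = [...short space-joined strings...]
def pvPriorityChunks : List String := [
  "player_id version name full_name description image",
  "height_cm weight_kg dob positions overall_rating potential",
  "value wage preferred_foot weak_foot skill_moves",
  "international_reputation body_type real_face",
  "release_clause specialities club_id club_name club_league_id",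
  "club_league_name club_logo club_rating club_position",
  "club_kit_number club_joined club_contract_valid_until",
  "country_id country_name country_league_id country_league_name",
  "country_flag country_rating country_position country_kit_number",
  "attacking_crossing attacking_finishing attacking_heading_accuracy",
  "attacking_short_passing attacking_volleys",
  "skill_dribbling skill_curve skill_fk_accuracy skill_long_passing",
  "skill_ball_control",
  "movement_acceleration movement_sprint_speed movement_agility",
  "movement_reactions movement_balance",
  "power_shot_power power_jumping power_stamina power_strength",
  "power_long_shots",
  "mentality_aggression mentality_interceptions mentality_att_positioning",
  "mentality_vision mentality_penalties mentality_composure",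
  "defending_defensive_awareness defending_standing_tackle defending_sliding_tackle",
  "goalkeeping_gk_diving goalkeeping_gk_handling goalkeeping_gk_kicking",
  "goalkeeping_gk_positioning goalkeeping_gk_reflexes",
  "play_styles url"]

-- _PRIORITY = [w for chunk in _PRIORITY_CHUNKS for w in chunk.split()]
def pvPriorityB : List String := pvPriorityChunks.flatMap (fun chunk => PySem.Str.split₀ chunk)

-- rank = {c: i for i, c in enumerate(_PRIORITY)}
def pvRank : PySem.Dict String Int :=
  (PySem.List.enumerate pvPriorityB).foldl (fun acc p => acc.insert p.2 p.1) PySem.Dict.empty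

def get_column_order_py_alt (stats_dict : List (String × Int)) : List String :=
  -- n = len(_PRIORITY); sorted(stats_dict.keys(), key=lambda c: (rank.get(c, n), c))
  PySem.List.sorted2 (PySem.Dict.keys (PySem.Dict.ofList stats_dict))
    (fun c => pvRank.getD c (pvPriorityB.length : Int)) (fun c => c) false

-- ===== PRECONDITION & SPEC =====
def Spec_get_column_order_py (stats_dict : List (String × Int)) (out : List String) : Prop := out = get_column_order_py_alt stats_dict
instance (stats_dict : List (String × Int)) (out : List String) : Decidable (Spec_get_column_order_py stats_dict out) := by unfold Spec_get_column_order_py; infer_instance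

-- ===== CLAIM (what is proved, stated in full; the proofs are below) =====
def Claim_equal_get_column_order_py : Prop := ∀ (stats_dict : List (String × Int)), Dom_get_column_order_py stats_dict → Spec_get_column_order_py stats_dict (get_column_order_py stats_dict)

-- ===== LEMMAS AND PROOFS =====

-- B's split string yields exactly A's list literal.
set_option maxRecDepth 100000 in
set_option maxHeartbeats 1600000 in
theorem pvPriorityB_eq : pvPriorityB = pvPriorityCols := by decide

-- Python's sorted with a 2-tuple key is sorted with the lexicographic product key.
theorem pv_sorted2_eq_sorted_lex {α : Type} (xs : List α) (k1 : α → Int) (k2 : α → String) :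
    PySem.List.sorted2 xs k1 k2 = PySem.List.sorted xs (fun x => toLex (k1 x, k2 x)) := by
  unfold PySem.List.sorted2 PySem.List.sorted
  have hbf : (fun a b => decide (k1 a < k1 b) || (!decide (k1 b < k1 a) && decide (k2 a < k2 b)))
      = (fun a b : α => decide ((toLex (k1 a, k2 a) : Lex (Int × String)) < toLex (k1 b, k2 b))) := by
    funext a b
    rcases lt_trichotomy (k1 a) (k1 b) with h | h | h
    · simp [Prod.Lex.lt_iff, h]
    · simp [Prod.Lex.lt_iff, h]
    · simp [Prod.Lex.lt_iff, h, not_lt_of_gt h, ne_of_gt h]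
  simp only [if_neg (by decide : ¬ (false = true))]
  rw [hbf]

theorem pv_sorted2_eq_of_perm_of_pairwise_lt {α : Type} (xs ys : List α) (k1 : α → Int) (k2 : α → String)
    (hperm : ys.Perm xs)
    (hp : ys.Pairwise (fun a b => k1 a < k1 b ∨ (k1 a = k1 b ∧ k2 a < k2 b))) :
    PySem.List.sorted2 xs k1 k2 = ys := by
  rw [pv_sorted2_eq_sorted_lex]
  refine PySem.List.sorted_eq_of_perm_of_pairwise_lt _ _ _ hperm (hp.imp ?_)
  intro a b h
  rw [Prod.Lex.lt_iff]
  simpa using h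

-- Lookup in a dict built by folding inserts: key not inserted.
theorem pv_fold_get?_not_mem (ps : List (Int × String)) (acc : PySem.Dict String Int) (c : String)
    (h : ∀ p ∈ ps, p.2 ≠ c) :
    (ps.foldl (fun a p => a.insert p.2 p.1) acc).get? c = acc.get? c := by
  induction ps generalizing acc with
  | nil => rfl
  | cons p rest ih =>
    simp only [List.foldl_cons]
    rw [ih _ (fun q hq => h q (List.mem_cons_of_mem _ hq)),
        PySem.Dict.get?_insert_of_ne _ _ (Ne.symm (h p (List.mem_cons_self)))]

-- Lookup in a dict built by folding inserts with pairwise-distinct keys: inserted key.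
theorem pv_fold_get?_mem (ps : List (Int × String)) (acc : PySem.Dict String Int) (i : Int) (c : String)
    (hnd : (ps.map Prod.snd).Nodup) (hm : (i, c) ∈ ps) :
    (ps.foldl (fun a p => a.insert p.2 p.1) acc).get? c = some i := by
  induction ps generalizing acc with
  | nil => cases hm
  | cons p rest ih =>
    simp only [List.map_cons, List.nodup_cons] at hnd
    simp only [List.foldl_cons]
    rcases List.mem_cons.1 hm with h | h
    · subst h
      rw [pv_fold_get?_not_mem _ _ _ (fun q hq hqc => hnd.1 (by simpa [← hqc] using List.mem_map_of_mem (f := Prod.snd) hq))]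
      exact PySem.Dict.get?_insert_self _ _ _
    · exact ih _ hnd.2 h

theorem pv_map_snd_enumerate {α : Type} (xs : List α) (s : Int) :
    (PySem.List.enumerate xs s).map Prod.snd = xs := by
  induction xs generalizing s with
  | nil => rfl
  | cons x t ih => simp [PySem.List.enumerate, ih]

theorem pv_mem_enumerate {α : Type} (xs : List α) (s : Int) (i : Nat) (h : i < xs.length) :
    ((s + i, xs[i]) : Int × α) ∈ PySem.List.enumerate xs s := by
  induction xs generalizing s i with
  | nil => simp at h
  | cons x t ih =>
    cases i with
    | zero => simp [PySem.List.enumerate]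
    | succ j =>
      have := ih (s + 1) j (by simpa using Nat.lt_of_succ_lt_succ h)
      simp only [PySem.List.enumerate, List.mem_cons]
      right
      have harith : (s + (1 : Int)) + (j : Int) = s + ((j : Nat) + 1 : Nat) := by push_cast; ring
      simpa [harith] using this

theorem pv_priority_nodup : pvPriorityCols.Nodup := by decide

-- rank.get(c, n) on a priority column is its index in the priority list.
theorem pv_rk_getElem (i : Nat) (h : i < pvPriorityCols.length) :
    pvRank.getD pvPriorityCols[i] (pvPriorityB.length : Int) = i := by
  rw [PySem.Dict.getD_eq_get?_getD, pvRank, pvPriorityB_eq,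
      pv_fold_get?_mem _ _ (i : Int) _
        (by rw [pv_map_snd_enumerate]; exact pv_priority_nodup)
        (by simpa using pv_mem_enumerate pvPriorityCols 0 i h)]
  rfl

-- rank.get(c, n) on a non-priority column is the fallback n.
theorem pv_rk_not_mem (c : String) (hc : c ∉ pvPriorityCols) :
    pvRank.getD c (pvPriorityB.length : Int) = (pvPriorityB.length : Int) := by
  rw [PySem.Dict.getD_eq_get?_getD, pvRank, pvPriorityB_eq,
      pv_fold_get?_not_mem _ _ _ (fun p hp hpc => by
        refine hc ?_
        have := List.mem_map_of_mem (f := Prod.snd) hp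
        rwa [pv_map_snd_enumerate, hpc] at this)]
  rfl

theorem pv_rk_lt_of_mem (c : String) (hc : c ∈ pvPriorityCols) :
    pvRank.getD c (pvPriorityB.length : Int) < (pvPriorityB.length : Int) := by
  rcases List.mem_iff_getElem.1 hc with ⟨i, hi, rfl⟩
  rw [pv_rk_getElem i hi, pvPriorityB_eq]
  exact_mod_cast hi

theorem pv_priority_rk_strict :
    pvPriorityCols.Pairwise (fun a b =>
      pvRank.getD a (pvPriorityB.length : Int) < pvRank.getD b (pvPriorityB.length : Int)) := by
  rw [List.pairwise_iff_getElem]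
  intro i j hi hj hij
  rw [pv_rk_getElem i hi, pv_rk_getElem j hj]
  exact_mod_cast hij

-- ===== VERDICT (by name: the statement is the Claim_ definition above) =====
theorem get_column_order_py_spec : Claim_equal_get_column_order_py := by
  intro d _
  unfold Spec_get_column_order_py get_column_order_py get_column_order_py_alt
  have hK : (PySem.Dict.ofList d).keys.Nodup := PySem.Dict.nodup_keys_ofList d
  set K := (PySem.Dict.ofList d).keys with hKdef
  rw [PySem.Set.ofList_eq_self_of_nodup K hK]
  set rk : String → Int := fun c => pvRank.getD c (pvPriorityB.length : Int) with hrk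
  set S := PySem.List.sorted (List.filter (fun col => !(pvPriorityCols.contains col)) K) (fun x => x) false with hS
  have hmemS : ∀ c ∈ S, c ∈ K ∧ c ∉ pvPriorityCols := by
    intro c hc
    rw [hS, PySem.List.mem_sorted, List.mem_filter] at hc
    exact ⟨hc.1, by simpa using hc.2⟩
  have hmemF : ∀ c ∈ List.filter (fun col => PySem.Set.contains K col) pvPriorityCols,
      c ∈ pvPriorityCols ∧ c ∈ K := by
    intro c hc
    rw [List.mem_filter, PySem.Set.contains_iff] at hc
    exact hc
  refine (pv_sorted2_eq_of_perm_of_pairwise_lt K _ rk (fun c => c) ?_ ?_).symm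
  · have h1 : (List.filter (fun col => PySem.Set.contains K col) pvPriorityCols).Perm
        (List.filter (fun col => pvPriorityCols.contains col) K) := by
      rw [List.perm_ext_iff_of_nodup (pv_priority_nodup.filter _) (hK.filter _)]
      intro a
      simp only [List.mem_filter, PySem.Set.contains_iff, List.contains_iff_mem]
      exact ⟨fun h => ⟨h.2, h.1⟩, fun h => ⟨h.2, h.1⟩⟩
    have h2 : S.Perm (List.filter (fun col => !(pvPriorityCols.contains col)) K) :=
      PySem.List.sorted_perm _ _ _
    exact (h1.append h2).trans (List.filter_append_perm _ K)
  · rw [List.pairwise_append]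
    refine ⟨?_, ?_, ?_⟩
    · exact (List.Pairwise.sublist List.filter_sublist pv_priority_rk_strict).imp (fun h => Or.inl h)
    · have hnd : S.Nodup := ((PySem.List.sorted_perm _ _ _).nodup_iff).2 (hK.filter _)
      have hle : S.Pairwise (fun a b => a ≤ b) := PySem.List.sorted_pairwise _ (fun x => x)
      refine (hle.and hnd).imp_of_mem ?_
      intro a b ha hb h
      right
      refine ⟨?_, lt_of_le_of_ne h.1 h.2⟩
      simp only [hrk]
      rw [pv_rk_not_mem a (hmemS a ha).2, pv_rk_not_mem b (hmemS b hb).2]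
    · intro a ha b hb
      left
      simp only [hrk]
      rw [pv_rk_not_mem b (hmemS b hb).2]
      exact pv_rk_lt_of_mem a (hmemF a ha).1
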